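-- pv_equiv track=rewrite | github.com/MidnightFlux/microsoft-courses-downloader | main.py | _find_course_by_id
-- ===== SOURCE A (Python) =====
-- from typing import Optional
--
-- def _find_course_by_id(course_id: str, courses: list[dict]) -> Optional[dict]:
--     """Find a course by its ID using exact or suffix matching.
--
--     Avoids false positives from substring matching (e.g. 'az-10' matching 'az-104t00').
--     """
--     course_id_lower = course_id.lower()
--     # Pass 1: exact match or exact last dotted segment
--     for course in courses:
--         uid = course.get("uid", "").lower()
--         last_segment = uid.rsplit(".", 1)[-1] if "." in uid else uid
--         if uid == course_id_lower or last_segment == course_id_lower: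
--             return course
--     # Pass 2: uid ends with the course id (e.g. 'learn.microsoft.com.az-140t00')
--     for course in courses:
--         uid = course.get("uid", "").lower()
--         if uid.endswith(course_id_lower):
--             return course
--     return None
-- ===== SOURCE B (Python) =====
-- from typing import Optional
--
--
-- def _find_course_by_id(course_id: str, courses: list[dict]) -> Optional[dict]:
--     """Single pass over courses keeping the first exact and first suffix match."""
--     cid = course_id.lower()
--     first_exact = None
--     first_suffix = None
--     for course in courses:
--         uid = course.get("uid", "").lower()
--         last_segment = uid.rsplit(".", 1)[-1] if "." in uid else uid
--         if first_exact is None and (uid == cid or last_segment == cid):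
--             first_exact = course
--         if first_suffix is None and uid.endswith(cid):
--             first_suffix = course
--     return first_exact if first_exact is not None else first_suffix
-- ===== Notes on version B (the rewrite author's own statement) =====
-- stated objective: simpler
-- what changed: Replaced A's two sequential scans (exact-match pass, then suffix pass) by a single pass that records the first exact match and the first suffix match in two accumulators and reconciles them after the loop.
import Mathlib
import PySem

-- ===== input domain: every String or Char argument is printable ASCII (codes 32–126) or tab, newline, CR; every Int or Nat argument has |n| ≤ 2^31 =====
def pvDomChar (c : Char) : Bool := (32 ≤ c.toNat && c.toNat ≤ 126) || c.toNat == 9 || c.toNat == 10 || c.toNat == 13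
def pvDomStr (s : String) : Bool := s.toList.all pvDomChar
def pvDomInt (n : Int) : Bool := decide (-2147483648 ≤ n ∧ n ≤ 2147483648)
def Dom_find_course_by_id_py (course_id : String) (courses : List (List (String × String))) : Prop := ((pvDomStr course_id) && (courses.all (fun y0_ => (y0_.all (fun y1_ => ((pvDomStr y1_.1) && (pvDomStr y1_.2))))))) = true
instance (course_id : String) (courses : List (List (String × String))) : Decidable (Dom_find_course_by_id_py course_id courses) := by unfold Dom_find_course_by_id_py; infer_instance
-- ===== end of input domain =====

-- B replaces A's two sequential scans by one pass with two accumulators (simpler: one traversal).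

-- ===== PORT A =====
-- uid.rsplit(".", 1)[-1] : everything after the LAST '.'; hand port (exact: the separator is
-- a single character, so the last piece of rsplit(".",1) is the maximal '.'-free suffix).
def pvLastSeg (s : String) : String :=
  String.ofList ((s.toList.reverse.takeWhile (fun c => c ≠ '.')).reverse)

-- course.get("uid", "").lower()
def pvUidOf (course : List (String × String)) : String :=
  PySem.Str.lower ((PySem.Dict.mk course).getD "uid" "")

-- last_segment = uid.rsplit(".", 1)[-1] if "." in uid else uid
def pvLastSegOf (uid : String) : String :=
  if PySem.Str.isIn "." uid then pvLastSeg uid else uid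

-- Pass 1 loop of A: first course with uid == cid or last_segment == cid
def pvPassExact (cid : String) : List (List (String × String)) → Option (List (String × String))
  | [] => none
  | course :: rest =>
    let uid := pvUidOf course
    let last_segment := pvLastSegOf uid
    if uid = cid ∨ last_segment = cid then some course else pvPassExact cid rest

-- Pass 2 loop of A: first course whose uid ends with cid
def pvPassSuffix (cid : String) : List (List (String × String)) → Option (List (String × String))
  | [] => none
  | course :: rest =>
    let uid := pvUidOf course
    if PySem.Str.endswith uid cid then some course else pvPassSuffix cid rest

def find_course_by_id_py (course_id : String) (courses : List (List (String × String))) : Option (List (String × String)) :=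
  let course_id_lower := PySem.Str.lower course_id
  match pvPassExact course_id_lower courses with
  | some course => some course
  | none =>
    match pvPassSuffix course_id_lower courses with
    | some course => some course
    | none => none

-- ===== PORT B =====
-- loop body of Source B: update (first_exact, first_suffix)
def pvStep (cid : String) (st : Option (List (String × String)) × Option (List (String × String)))
    (course : List (String × String)) :
    Option (List (String × String)) × Option (List (String × String)) :=
  let uid := pvUidOf course
  let last_segment := pvLastSegOf uid
  let first_exact :=
    if st.1 = none ∧ (uid = cid ∨ last_segment = cid) then some course else st.1
  let first_suffix :=
    if st.2 = none ∧ PySem.Str.endswith uid cid then some course else st.2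
  (first_exact, first_suffix)

def find_course_by_id_py_alt (course_id : String) (courses : List (List (String × String))) : Option (List (String × String)) :=
  let cid := PySem.Str.lower course_id
  let st := courses.foldl (pvStep cid) (none, none)
  match st.1 with
  | some course => some course
  | none => st.2

-- ===== PRECONDITION & SPEC =====
def Spec_find_course_by_id_py (course_id : String) (courses : List (List (String × String))) (out : Option (List (String × String))) : Prop := out = find_course_by_id_py_alt course_id courses
instance (course_id : String) (courses : List (List (String × String))) (out : Option (List (String × String))) : Decidable (Spec_find_course_by_id_py course_id courses out) := by unfold Spec_find_course_by_id_py; infer_instance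

-- ===== CLAIM (what is proved, stated in full; the proofs are below) =====
def Claim_equal_find_course_by_id_py : Prop := ∀ (course_id : String) (courses : List (List (String × String))), Dom_find_course_by_id_py course_id courses → Spec_find_course_by_id_py course_id courses (find_course_by_id_py course_id courses)

-- ===== LEMMAS AND PROOFS =====

/-- The single-pass fold computes exactly (first pass-1 hit, first pass-2 hit),
each accumulator set once and never overwritten. -/
theorem pvFold_eq (cid : String) (courses : List (List (String × String)))
    (e s : Option (List (String × String))) :
    courses.foldl (pvStep cid) (e, s)
      = (match e with | some c => some c | none => pvPassExact cid courses,
         match s with | some c => some c | none => pvPassSuffix cid courses) := by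
  induction courses generalizing e s with
  | nil => cases e <;> cases s <;> rfl
  | cons course rest ih =>
    simp only [List.foldl_cons, pvStep, pvPassExact, pvPassSuffix]
    rw [ih]
    cases e <;> cases s <;> simp <;> split_ifs <;> simp_all

theorem find_course_by_id_py_eq (course_id : String) (courses : List (List (String × String))) :
    Spec_find_course_by_id_py course_id courses (find_course_by_id_py course_id courses) := by
  unfold Spec_find_course_by_id_py
  show _ = (let cid := PySem.Str.lower course_id;
      let st := courses.foldl (pvStep cid) (none, none);
      match st.1 with | some course => some course | none => st.2)
  simp only [find_course_by_id_py, pvFold_eq]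
  cases pvPassExact (PySem.Str.lower course_id) courses <;>
    cases pvPassSuffix (PySem.Str.lower course_id) courses <;> rfl

-- ===== VERDICT (by name: the statement is the Claim_ definition above) =====
theorem find_course_by_id_py_spec : Claim_equal_find_course_by_id_py := by
  intro course_id courses _
  exact find_course_by_id_py_eq course_id courses
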